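-- pv_equiv track=rewrite | github.com/BarryDeHondt/coursematerial_2425 | 06-loops/08-assignment-rpg/student.py | goal_amount_dice_3
-- ===== SOURCE A (Python) =====
-- def goal_amount_dice_3(n_sides, goal):
--     winning_combinaties = 0
--     for dobbelsteen_1 in range(1, n_sides + 1):
--         for dobbelsteen_2 in range(1, n_sides + 1):
--             for dobbelsteen_3 in range(1, n_sides + 1):
--                 if dobbelsteen_1 + dobbelsteen_2 + dobbelsteen_3 >= goal:
--                     winning_combinaties += 1
--     return winning_combinaties
-- ===== SOURCE B (Python) =====
-- def goal_amount_dice_3(n_sides, goal):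
--     total = 0
--     for d1 in range(1, n_sides + 1):
--         for d2 in range(1, n_sides + 1):
--             # number of d3 in 1..n_sides with d1 + d2 + d3 >= goal, in closed form
--             total += min(n_sides, max(0, n_sides - (goal - d1 - d2) + 1))
--     return total
-- ===== Notes on version B (the rewrite author's own statement) =====
-- stated objective: faster
-- what changed: The innermost loop over the third die is replaced by a closed-form count of third-die values reaching the goal, turning the triple loop into a double loop.
import Mathlib
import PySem

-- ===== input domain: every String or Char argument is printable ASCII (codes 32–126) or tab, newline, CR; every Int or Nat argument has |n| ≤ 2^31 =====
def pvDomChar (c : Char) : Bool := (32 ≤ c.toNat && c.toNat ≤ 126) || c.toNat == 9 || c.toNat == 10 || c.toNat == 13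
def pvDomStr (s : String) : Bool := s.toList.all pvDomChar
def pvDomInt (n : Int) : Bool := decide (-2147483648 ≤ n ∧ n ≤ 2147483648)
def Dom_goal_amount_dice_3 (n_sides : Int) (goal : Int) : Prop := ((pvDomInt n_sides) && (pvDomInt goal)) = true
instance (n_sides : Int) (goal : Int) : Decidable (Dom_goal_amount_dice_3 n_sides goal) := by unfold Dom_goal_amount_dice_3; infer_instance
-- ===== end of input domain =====

-- B replaces A's innermost loop by a closed-form count of winning third-die values (O(n^3) -> O(n^2)).


-- ===== PORT A =====
def goal_amount_dice_3 (n_sides : Int) (goal : Int) : Int :=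
  (PySem.List.pyRange 1 (n_sides + 1) 1).foldl (fun acc dobbelsteen_1 =>
    (PySem.List.pyRange 1 (n_sides + 1) 1).foldl (fun acc dobbelsteen_2 =>
      (PySem.List.pyRange 1 (n_sides + 1) 1).foldl (fun acc dobbelsteen_3 =>
        if goal ≤ dobbelsteen_1 + dobbelsteen_2 + dobbelsteen_3 then acc + 1 else acc)
        acc) acc) 0

-- ===== PORT B =====
def goal_amount_dice_3_alt (n_sides : Int) (goal : Int) : Int :=
  (PySem.List.pyRange 1 (n_sides + 1) 1).foldl (fun total d1 =>
    (PySem.List.pyRange 1 (n_sides + 1) 1).foldl (fun total d2 =>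
      total + min n_sides (max 0 (n_sides - (goal - d1 - d2) + 1))) total) 0

-- ===== PRECONDITION & SPEC =====
def Spec_goal_amount_dice_3 (n_sides : Int) (goal : Int) (out : Int) : Prop := out = goal_amount_dice_3_alt n_sides goal
instance (n_sides : Int) (goal : Int) (out : Int) : Decidable (Spec_goal_amount_dice_3 n_sides goal out) := by unfold Spec_goal_amount_dice_3; infer_instance

-- ===== CLAIM (what is proved, stated in full; the proofs are below) =====
def Claim_equal_goal_amount_dice_3 : Prop := ∀ (n_sides : Int) (goal : Int), Dom_goal_amount_dice_3 n_sides goal → Spec_goal_amount_dice_3 n_sides goal (goal_amount_dice_3 n_sides goal)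

-- ===== LEMMAS AND PROOFS =====

-- counting k in 1..n with t ≤ k equals the closed form B uses
theorem countGe (n : Int) (hn : 0 ≤ n) (t a : Int) :
    (PySem.List.pyRange 1 (n + 1) 1).foldl (fun acc k => if t ≤ k then acc + 1 else acc) a
      = a + min n (max 0 (n - t + 1)) := by
  induction n, hn using Int.le_induction generalizing a with
  | base =>
      rw [PySem.List.pyRange_one_eq_nil (by omega)]
      simp only [List.foldl_nil]
      omega
  | succ n hn ih =>
      rw [PySem.List.pyRange_one_succ_right (by omega : (1:Int) ≤ n + 1), List.foldl_append, ih]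
      simp only [List.foldl_cons, List.foldl_nil]
      split_ifs <;> omega

-- ===== VERDICT (by name: the statement is the Claim_ definition above) =====
theorem goal_amount_dice_3_spec : Claim_equal_goal_amount_dice_3 := by
  intro n_sides goal _
  unfold Spec_goal_amount_dice_3 goal_amount_dice_3 goal_amount_dice_3_alt
  by_cases hn : 0 ≤ n_sides
  · refine PySem.List.foldl_congr_mem _ _ _ _ ?_
    intro acc d1 _
    refine PySem.List.foldl_congr_mem _ _ _ _ ?_
    intro acc2 d2 _
    have hcond : (PySem.List.pyRange 1 (n_sides + 1) 1).foldl
        (fun acc k => if goal ≤ d1 + d2 + k then acc + 1 else acc) acc2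
        = (PySem.List.pyRange 1 (n_sides + 1) 1).foldl
        (fun acc k => if goal - d1 - d2 ≤ k then acc + 1 else acc) acc2 := by
      refine PySem.List.foldl_congr_mem _ _ _ _ ?_
      intro a k _
      split_ifs <;> omega
    rw [hcond, countGe n_sides hn]
  · rw [PySem.List.pyRange_one_eq_nil (by omega)]
    simp only [List.foldl_nil]
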